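-- pv_equiv track=rewrite | github.com/Sachin28062004/AI_Notes_Sumarizer | utils/ALLOWED_EXTENSIONS.py | allowed_file
-- ===== SOURCE A (Python) =====
-- ALLOWED_EXTENSIONS = {
--     'text': {'txt', 'md'},
--     'document': {'pdf', 'docx'},
--     'image': {'jpg', 'jpeg', 'png'},
--     'audio': {'mp3', 'wav'}
-- }
--
-- def allowed_file(filename, file_types):
--     if '.' not in filename:
--         return False
--
--     ext = filename.rsplit('.', 1)[1].lower()
--     extensions = set()
--
--     for file_type in file_types:
--         extensions.update(ALLOWED_EXTENSIONS.get(file_type, set()))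
--
--     return ext in extensions
-- ===== SOURCE B (Python) =====
-- ALLOWED_EXTENSIONS = {
--     'text': {'txt', 'md'},
--     'document': {'pdf', 'docx'},
--     'image': {'jpg', 'jpeg', 'png'},
--     'audio': {'mp3', 'wav'}
-- }
--
-- # inverted index: extension -> the (unique) file type that owns it, built once
-- _EXT_TO_TYPE = {ext: file_type
--                 for file_type, exts in ALLOWED_EXTENSIONS.items()
--                 for ext in exts}
--
-- def allowed_file(filename, file_types):
--     if '.' not in filename:
--         return False
--     ext = filename.rsplit('.', 1)[1].lower()
--     owner = _EXT_TO_TYPE.get(ext)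
--     return owner is not None and owner in file_types
-- ===== Notes on version B (the rewrite author's own statement) =====
-- stated objective: alternative
-- what changed: B builds an inverted index extension->owning-type once at module load and answers with a single dict lookup plus one membership test in file_types, instead of A's per-call union of all requested types' extension sets followed by a set-membership test; correct because the extension sets are pairwise disjoint.
import Mathlib
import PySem

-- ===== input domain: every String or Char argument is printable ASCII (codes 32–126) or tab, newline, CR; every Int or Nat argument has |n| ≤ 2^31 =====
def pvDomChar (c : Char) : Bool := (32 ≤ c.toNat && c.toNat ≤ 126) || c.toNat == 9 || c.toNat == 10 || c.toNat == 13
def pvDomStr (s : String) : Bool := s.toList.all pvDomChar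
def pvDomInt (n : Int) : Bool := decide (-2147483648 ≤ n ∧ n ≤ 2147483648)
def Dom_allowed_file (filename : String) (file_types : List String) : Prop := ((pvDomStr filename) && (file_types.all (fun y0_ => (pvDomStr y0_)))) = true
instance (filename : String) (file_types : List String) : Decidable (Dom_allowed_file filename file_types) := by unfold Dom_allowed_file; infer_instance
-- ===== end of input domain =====

-- B replaces A's per-call union of the requested types' extension sets with an inverted index
-- extension -> owning type, built once; a single lookup plus one membership test gives the same answer
-- because the extension sets are pairwise disjoint.

-- module constant ALLOWED_EXTENSIONS (shared context of both Pythons)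
def allowedExtensions : PySem.Dict String (PySem.Set String) :=
  PySem.Dict.ofList
    [("text", PySem.Set.ofList ["txt", "md"]),
     ("document", PySem.Set.ofList ["pdf", "docx"]),
     ("image", PySem.Set.ofList ["jpg", "jpeg", "png"]),
     ("audio", PySem.Set.ofList ["mp3", "wav"])]

-- ext = filename.rsplit('.', 1)[1].lower(): the (lowered) suffix after the LAST '.'
-- (exact when '.' ∈ filename, the only case where it is used; rsplit-with-maxsplit-1 = cut at rfind)
def extOf (filename : String) : String :=
  String.ofList (PySem.Chars.lower
    (filename.toList.drop ((PySem.Chars.rfind filename.toList ['.']).toNat + 1)))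

-- ===== PORT A =====
def allowed_file (filename : String) (file_types : List String) : Bool :=
  if PySem.Str.isIn "." filename = false then false
  else
    let ext := extOf filename
    let extensions := file_types.foldl
      (fun s ft => PySem.Set.update s (PySem.Dict.getD allowedExtensions ft PySem.Set.empty))
      PySem.Set.empty
    PySem.Set.contains extensions ext

-- ===== PORT B =====
-- _EXT_TO_TYPE = {ext: file_type for file_type, exts in ALLOWED_EXTENSIONS.items() for ext in exts}
def extToType : PySem.Dict String String :=
  (PySem.Dict.items allowedExtensions).foldl
    (fun d p => p.2.foldl (fun d ext => PySem.Dict.insert d ext p.1) d)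
    PySem.Dict.empty

def allowed_file_alt (filename : String) (file_types : List String) : Bool :=
  if PySem.Str.isIn "." filename = false then false
  else
    let ext := extOf filename
    match PySem.Dict.get? extToType ext with
    | none => false
    | some owner => file_types.contains owner

-- ===== PRECONDITION & SPEC =====
def Spec_allowed_file (filename : String) (file_types : List String) (out : Bool) : Prop := out = allowed_file_alt filename file_types
instance (filename : String) (file_types : List String) (out : Bool) : Decidable (Spec_allowed_file filename file_types out) := by unfold Spec_allowed_file; infer_instance

-- ===== CLAIM (what is proved, stated in full; the proofs are below) =====
def Claim_equal_allowed_file : Prop := ∀ (filename : String) (file_types : List String), Dom_allowed_file filename file_types → Spec_allowed_file filename file_types (allowed_file filename file_types)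

-- ===== LEMMAS AND PROOFS =====

lemma contains_update_eq (s t : PySem.Set String) (x : String) :
    PySem.Set.contains (PySem.Set.update s t) x
      = (PySem.Set.contains s x || PySem.Set.contains t x) := by
  simp [PySem.Set.mem_update]

lemma contains_foldl_update (g : String → PySem.Set String) (x : String) :
    ∀ (fts : List String) (s : PySem.Set String),
      PySem.Set.contains (fts.foldl (fun s ft => PySem.Set.update s (g ft)) s) x
        = (PySem.Set.contains s x || fts.any (fun ft => PySem.Set.contains (g ft) x)) := by
  intro fts
  induction fts with
  | nil => intro s; simp
  | cons a l ih =>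
      intro s
      simp only [List.foldl_cons, ih, List.any_cons, contains_update_eq, Bool.or_assoc]

-- per-type membership agrees with the inverted-index lookup (extension sets are pairwise disjoint)
set_option maxHeartbeats 2000000 in
lemma contains_getD_eq_lookup (ft ext : String) :
    PySem.Set.contains (PySem.Dict.getD allowedExtensions ft PySem.Set.empty) ext
      = (PySem.Dict.get? extToType ext == some ft) := by
  have ha : allowedExtensions = PySem.Dict.mk
    [("text", ["txt", "md"]), ("document", ["pdf", "docx"]),
     ("image", ["jpg", "jpeg", "png"]), ("audio", ["mp3", "wav"])] := by decide
  have hb : extToType = PySem.Dict.mk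
      [("txt", "text"), ("md", "text"), ("pdf", "document"), ("docx", "document"),
       ("jpg", "image"), ("jpeg", "image"), ("png", "image"), ("mp3", "audio"), ("wav", "audio")] := by decide
  rw [ha, hb]; clear ha hb
  simp only [PySem.Dict.getD, PySem.Dict.get?_mk_cons]
  split_ifs <;> (try simp only [beq_iff_eq] at *) <;> subst_vars <;> simp_all [PySem.Set.contains, PySem.Dict.get?, ne_comm]

-- ===== VERDICT (by name: the statement is the Claim_ definition above) =====
theorem allowed_file_spec : Claim_equal_allowed_file := by
  intro filename file_types _
  unfold Spec_allowed_file allowed_file allowed_file_alt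
  split
  · rfl
  · rw [contains_foldl_update]
    simp only [contains_getD_eq_lookup]
    cases h : PySem.Dict.get? extToType (extOf filename) with
    | none => simp [PySem.Set.contains, PySem.Set.empty]
    | some owner =>
        simp [PySem.Set.contains, PySem.Set.empty, List.any_beq]
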